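-- pv_equiv track=rewrite | github.com/SOFE3720-AI/mancala | minmax/RaffyMancala.py | getFutureState
-- ===== SOURCE A (Python) =====
-- def getFutureState(select, board, maxPlayer):
--     moves = board[select - 1]
--     board[select - 1] = 0
--     i = select
--
--     # Default value of extra
--     if maxPlayer:
--         extra = False
--     else:
--         extra = True
--
--     while moves > 0:
--         if i >= len(board):
--             i = 0
--         # Stealing
--         if moves == 1 and board[i] == 0 and i != 6 and i != 13:
--             board[i] = board[12-i]
--             board[12-i] = 0
--
--         # Extra turn
--         if moves == 1:
--             if maxPlayer and i == 6:
--                 extra = True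
--             elif maxPlayer == False and i == 13:
--                 extra = False
--
--         board[i]+=1
--         i+=1
--         moves-=1
--
--     return board, extra
-- ===== SOURCE B (Python) =====
-- def getFutureState(select, board, maxPlayer):
--     # Arithmetic sowing: full laps via divmod, landing pit computed directly instead of a per-stone loop.
--     # Equivalence is about the return value; A also mutates `board` in place, B only clears board[select-1].
--     n = len(board)
--     moves = board[select - 1]
--     board[select - 1] = 0
--     extra = not maxPlayer
--     if moves <= 0:
--         return board, extra
--     s = select % n
--     q, r = divmod(moves, n)
--     res = [v + q + (1 if (p - s) % n < r else 0) for p, v in enumerate(board)]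
--     j = (s + moves - 1) % n
--     if maxPlayer and j == 6:
--         extra = True
--     elif (not maxPlayer) and j == 13:
--         extra = False
--     if board[j] + (moves - 1) // n == 0 and j != 6 and j != 13:
--         t = (12 - j) % n
--         if t != j:
--             res[j] = res[t] + 1
--             res[t] = 0
--     return res, extra
-- ===== Notes on version B (the rewrite author's own statement) =====
-- stated objective: alternative
-- what changed: Replaces A's stone-by-stone sowing loop with closed-form arithmetic: divmod gives the full laps and remainder, one list comprehension distributes them, and the landing pit for the steal/extra-turn rules is computed directly with modular arithmetic (cost O(len(board)) instead of O(stones+len(board)), though not measurably faster on a timing run's inputs).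
import Mathlib
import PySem

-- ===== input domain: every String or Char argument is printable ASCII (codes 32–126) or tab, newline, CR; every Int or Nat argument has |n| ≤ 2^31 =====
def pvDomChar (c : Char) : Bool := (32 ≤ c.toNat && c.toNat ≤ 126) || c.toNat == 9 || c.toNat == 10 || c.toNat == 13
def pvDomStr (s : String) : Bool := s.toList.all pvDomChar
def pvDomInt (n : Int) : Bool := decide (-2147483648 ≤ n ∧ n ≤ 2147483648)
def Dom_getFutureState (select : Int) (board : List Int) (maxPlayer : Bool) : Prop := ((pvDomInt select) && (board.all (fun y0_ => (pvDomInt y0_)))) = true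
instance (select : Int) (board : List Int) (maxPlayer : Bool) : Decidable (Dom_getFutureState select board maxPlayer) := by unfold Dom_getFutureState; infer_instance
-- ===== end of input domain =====

-- B replaces A's one-iteration-per-stone sowing loop by closed-form lap arithmetic (divmod + direct
-- landing-pit computation). Equivalence is about the RETURN value; Python A mutates `board` fully
-- in place while B only clears the selected pit.

-- ===== PORT A =====
-- the `while moves > 0` loop; fuel = moves (the loop decrements `moves` by exactly 1 per iteration)
def pvALoop (maxPlayer : Bool) : Nat → Int → List Int → Bool → List Int × Bool
  | 0, _, board, extra => (board, extra)
  | m + 1, i, board, extra =>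
    -- if i >= len(board): i = 0
    let i : Int := if (board.length : Int) ≤ i then 0 else i
    -- stealing (moves == 1 ⟺ fuel m+1 has m = 0)
    let board :=
      if m = 0 ∧ PySem.List.pyGetD board i 0 = 0 ∧ i ≠ 6 ∧ i ≠ 13 then
        PySem.List.pySetD (PySem.List.pySetD board i (PySem.List.pyGetD board (12 - i) 0)) (12 - i) 0
      else board
    -- extra turn
    let extra :=
      if m = 0 then
        if maxPlayer && i == 6 then true
        else if !maxPlayer && i == 13 then false
        else extra
      else extra
    -- board[i] += 1
    let board := PySem.List.pySetD board i (PySem.List.pyGetD board i 0 + 1)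
    pvALoop maxPlayer m (i + 1) board extra

def getFutureState (select : Int) (board : List Int) (maxPlayer : Bool) : List Int × Bool :=
  match PySem.List.pyGet? board (select - 1) with
  | none => (board, !maxPlayer)   -- Python raises IndexError here (outside Pre_)
  | some moves =>
    let board := PySem.List.pySetD board (select - 1) 0
    let extra := if maxPlayer then false else true
    pvALoop maxPlayer moves.toNat select board extra

-- ===== PORT B =====
def getFutureState_alt (select : Int) (board : List Int) (maxPlayer : Bool) : List Int × Bool :=
  let n : Int := board.length
  match PySem.List.pyGet? board (select - 1) with
  | none => (board, !maxPlayer)   -- Python raises IndexError here (outside Pre_)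
  | some moves =>
    let board := PySem.List.pySetD board (select - 1) 0
    let extra := !maxPlayer
    if moves ≤ 0 then (board, extra)
    else
      let s := PySem.Int.mod select n
      let q := PySem.Int.floordiv moves n
      let r := PySem.Int.mod moves n
      let res := (PySem.List.enumerate board 0).map
        (fun pv => pv.2 + q + (if PySem.Int.mod (pv.1 - s) n < r then 1 else 0))
      let j := PySem.Int.mod (s + moves - 1) n
      let extra :=
        if maxPlayer && j == 6 then true
        else if !maxPlayer && j == 13 then false
        else extra
      if PySem.List.pyGetD board j 0 + PySem.Int.floordiv (moves - 1) n = 0 ∧ j ≠ 6 ∧ j ≠ 13 then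
        let t := PySem.Int.mod (12 - j) n
        if t ≠ j then
          let res' := PySem.List.pySetD res j (PySem.List.pyGetD res t 0 + 1)
          (PySem.List.pySetD res' t 0, extra)
        else (res, extra)
      else (res, extra)

-- ===== PRECONDITION & SPEC =====
-- Pre_ restricts `select` to the game's natural pit range 1..len(board) (for select ≤ 0 Python A sows via
-- negative-index wraparound but compares the raw negative index with 6/13 in the steal/extra-turn rules,
-- which B does not reproduce), and excludes the inputs on which A's final-stone steal reads board[12 - j]
-- past the end of a short board and raises IndexError.
def Pre_getFutureState (select : Int) (board : List Int) (maxPlayer : Bool) : Prop :=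
  1 ≤ select ∧ select ≤ board.length ∧
  (let n : Int := board.length
   let m := PySem.List.pyGetD board (select - 1) 0
   let j := PySem.Int.mod (PySem.Int.mod select n + m - 1) n
   (1 ≤ m ∧ PySem.List.pyGetD (PySem.List.pySetD board (select - 1) 0) j 0
              + PySem.Int.floordiv (m - 1) n = 0 ∧ j ≠ 6 ∧ j ≠ 13) → 13 - n ≤ j)

instance (select : Int) (board : List Int) (maxPlayer : Bool) : Decidable (Pre_getFutureState select board maxPlayer) := by
  unfold Pre_getFutureState; infer_instance

def pvWitness_getFutureState : Int × List Int × Bool := (3, [3, 0, 4, 4, 0, 1, 0, 2, 2, 2, 1, 0, 5, 0], true)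

def Spec_getFutureState (select : Int) (board : List Int) (maxPlayer : Bool) (out : List Int × Bool) : Prop := out = getFutureState_alt select board maxPlayer
instance (select : Int) (board : List Int) (maxPlayer : Bool) (out : List Int × Bool) : Decidable (Spec_getFutureState select board maxPlayer out) := by unfold Spec_getFutureState; infer_instance

-- ===== CLAIM (what is proved, stated in full; the proofs are below) =====
def Claim_equal_getFutureState : Prop := ∀ (select : Int) (board : List Int) (maxPlayer : Bool), Dom_getFutureState select board maxPlayer → Pre_getFutureState select board maxPlayer → Spec_getFutureState select board maxPlayer (getFutureState select board maxPlayer)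

-- ===== LEMMAS AND PROOFS =====

-- one stone dropped into pit p
def pvBump (b : List Int) (p : Nat) : List Int := b.set p (b.getD p 0 + 1)

-- pure sowing of m stones starting at pit s (no steal / extra-turn logic)
def pvSow : Nat → Nat → List Int → List Int
  | 0, _, b => b
  | m + 1, s, b => pvSow m ((s + 1) % b.length) (pvBump b s)

-- the final stone's step: steal, extra turn, then drop the stone into pit j
def pvFinal (maxPlayer : Bool) (b : List Int) (j : Int) (e : Bool) : List Int × Bool :=
  let b1 :=
    if PySem.List.pyGetD b j 0 = 0 ∧ j ≠ 6 ∧ j ≠ 13 then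
      PySem.List.pySetD (PySem.List.pySetD b j (PySem.List.pyGetD b (12 - j) 0)) (12 - j) 0
    else b
  let e1 :=
    if maxPlayer && j == 6 then true
    else if !maxPlayer && j == 13 then false
    else e
  (PySem.List.pySetD b1 j (PySem.List.pyGetD b1 j 0 + 1), e1)

-- number of stones pit p receives when m stones are sown from pit s on a board of length N
def pvCnt (N m s p : Nat) : Nat := (List.range m).countP (fun k => decide ((s + k) % N = p))

theorem pvBump_length (b : List Int) (p : Nat) : (pvBump b p).length = b.length := by
  simp [pvBump]

theorem pvSow_length (m : Nat) : ∀ (s : Nat) (b : List Int), (pvSow m s b).length = b.length := by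
  induction m with
  | zero => intro s b; rfl
  | succ m ih => intro s b; simp [pvSow, ih, pvBump_length]

theorem pvIdxNorm (i : Int) (N : Nat) (hN : 0 < N) (h0 : 0 ≤ i) (hle : i ≤ (N : Int)) :
    (if (N : Int) ≤ i then (0 : Int) else i) = ((i.toNat % N : Nat) : Int) := by
  split_ifs with h
  · have h1 : i.toNat = N := by omega
    rw [h1, Nat.mod_self]; rfl
  · have h1 : i.toNat < N := by omega
    rw [Nat.mod_eq_of_lt h1]; omega

theorem pvTn (x : Nat) : (((x : Int)) + 1).toNat = x + 1 := by omega

theorem pvALoop_eq (mp : Bool) (M : Nat) : ∀ (i : Int) (b : List Int) (e : Bool),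
    0 < b.length → 0 ≤ i → i ≤ b.length →
    pvALoop mp (M + 1) i b e
      = pvFinal mp (pvSow M (i.toNat % b.length) b)
          (((i.toNat % b.length + M) % b.length : Nat) : Int) e := by
  induction M with
  | zero =>
    intro i b e hN h0 hle
    have hi' := pvIdxNorm i b.length hN h0 hle
    have hj : (i.toNat % b.length + 0) % b.length = i.toNat % b.length := by
      rw [Nat.add_zero]; exact Nat.mod_mod_of_dvd _ (dvd_refl _)
    rw [hj]
    simp only [pvALoop, pvSow, pvFinal, hi']
    simp
  | succ M ih =>
    intro i b e hN h0 hle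
    have hi' := pvIdxNorm i b.length hN h0 hle
    have hiN : i.toNat % b.length < b.length := Nat.mod_lt _ hN
    have hstep : pvALoop mp (M + 1 + 1) i b e
        = pvALoop mp (M + 1) ((if (b.length : Int) ≤ i then 0 else i) + 1)
            (PySem.List.pySetD b (if (b.length : Int) ≤ i then 0 else i)
              (PySem.List.pyGetD b (if (b.length : Int) ≤ i then 0 else i) 0 + 1)) e := rfl
    rw [hstep, hi']
    have hb2 : PySem.List.pySetD b ((i.toNat % b.length : Nat) : Int)
        (PySem.List.pyGetD b ((i.toNat % b.length : Nat) : Int) 0 + 1)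
        = pvBump b (i.toNat % b.length) := by
      rw [PySem.List.pySetD_natCast, PySem.List.pyGetD_natCast]
      rfl
    rw [hb2]
    have hlen : (pvBump b (i.toNat % b.length)).length = b.length := pvBump_length _ _
    have happ := ih (((i.toNat % b.length : Nat) : Int) + 1) (pvBump b (i.toNat % b.length)) e
      (by rw [hlen]; exact hN) (by omega) (by rw [hlen]; omega)
    rw [happ]
    rw [pvTn, hlen]
    have hsow : pvSow M ((i.toNat % b.length + 1) % b.length) (pvBump b (i.toNat % b.length))
        = pvSow (M + 1) (i.toNat % b.length) b := rfl
    rw [hsow]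
    have hjj : ((i.toNat % b.length + 1) % b.length + M) % b.length
        = (i.toNat % b.length + (M + 1)) % b.length := by
      rw [Nat.mod_add_mod]
      ring_nf
    rw [hjj]

theorem pvCnt_succ (N m s p : Nat) :
    pvCnt N (m + 1) s p = pvCnt N m s p + if (s + m) % N = p then 1 else 0 := by
  by_cases h : (s + m) % N = p <;>
    simp [pvCnt, List.range_succ, List.countP_append, List.countP_cons, h]

theorem pvBump_getD (b : List Int) (s p : Nat) (hs : s < b.length) (hp : p < b.length) :
    (pvBump b s).getD p 0 = b.getD p 0 + if p = s then 1 else 0 := by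
  by_cases h : p = s
  · subst h; simp [pvBump, List.getD, hp]
  · simp [pvBump, List.getD_eq_getElem, hp, List.getElem_set_ne (by omega : s ≠ p), h]

theorem pvCnt_head (N m s p : Nat) (hs : s < N) :
    pvCnt N (m + 1) s p = (if p = s then 1 else 0) + pvCnt N m ((s + 1) % N) p := by
  have hshift : ∀ k, ((s + 1) % N + k) % N = (s + 1 + k) % N := fun k => Nat.mod_add_mod _ _ _
  simp only [pvCnt, List.range_succ_eq_map, List.countP_cons, List.countP_map, Function.comp_def,
    hshift]
  have hcnt : List.countP (fun x => decide ((s + (x + 1)) % N = p)) (List.range m)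
      = List.countP (fun k => decide ((s + 1 + k) % N = p)) (List.range m) := by
    apply List.countP_congr; intro k _
    simp only [decide_eq_true_eq]
    rw [show s + (k + 1) = s + 1 + k from by ring]
  have h0 : ((s + 0) % N = p) = (p = s) := by
    rw [Nat.add_zero, Nat.mod_eq_of_lt hs]; exact propext eq_comm
  rw [hcnt]
  by_cases hps : p = s
  · simp [hps, Nat.mod_eq_of_lt hs, Nat.add_comm]
  · have hsp : s ≠ p := fun h => hps h.symm
    simp [Nat.mod_eq_of_lt hs, hps, hsp]

theorem pvSow_getD (m : Nat) : ∀ (s : Nat) (b : List Int) (p : Nat), s < b.length → p < b.length →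
    (pvSow m s b).getD p 0 = b.getD p 0 + (pvCnt b.length m s p : Int) := by
  induction m with
  | zero => intro s b p hs hp; simp [pvSow, pvCnt]
  | succ m ih =>
    intro s b p hs hp
    have hlen : (pvBump b s).length = b.length := pvBump_length b s
    have hrec : pvSow (m + 1) s b = pvSow m ((s + 1) % b.length) (pvBump b s) := rfl
    have hN : 0 < b.length := by omega
    rw [hrec, ih ((s + 1) % b.length) (pvBump b s) p (by rw [hlen]; exact Nat.mod_lt _ hN) (by omega),
        pvBump_getD b s p hs hp, hlen, pvCnt_head _ _ _ _ hs]
    push_cast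
    ring

theorem pvCnt_closed (N m s p d : Nat) (hN : 0 < N) (hd : d < N)
    (hiff : ∀ k, (s + k) % N = p ↔ k % N = d) :
    pvCnt N m s p = m / N + if d < m % N then 1 else 0 := by
  induction m with
  | zero => simp [pvCnt]
  | succ m ih =>
    rw [pvCnt_succ, ih]
    have h := Nat.div_add_mod m N
    have hr : m % N < N := Nat.mod_lt _ hN
    by_cases hc : m % N + 1 = N
    · have hdiv : (m + 1) / N = m / N + 1 ∧ (m + 1) % N = 0 :=
        (Nat.div_mod_unique hN).mpr ⟨by rw [Nat.mul_add]; omega, hN⟩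
      rw [hdiv.1, hdiv.2]
      simp only [hiff m]
      split_ifs <;> omega
    · have hdiv : (m + 1) / N = m / N ∧ (m + 1) % N = m % N + 1 :=
        (Nat.div_mod_unique hN).mpr ⟨by omega, by omega⟩
      rw [hdiv.1, hdiv.2]
      simp only [hiff m]
      split_ifs <;> omega

theorem pvSubEmod (x y n : Int) : (x % n - y) % n = (x - y) % n := by
  conv_lhs => rw [Int.sub_emod]
  rw [Int.emod_emod_of_dvd _ (dvd_refl _), ← Int.sub_emod]

theorem pvD_spec (s p N : Nat) (hs : s < N) (hp : p < N) :
    ((((p : Int) - s).emod N).toNat < N) ∧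
      ∀ k, ((s + k) % N = p ↔ k % N = (((p : Int) - s).emod N).toNat) := by
  have hN0 : (0 : Int) < (N : Int) := by exact_mod_cast (show 0 < N by omega)
  have hnn : 0 ≤ ((p : Int) - s).emod N := Int.emod_nonneg _ (by omega)
  have hlt : ((p : Int) - s).emod N < N := Int.emod_lt_of_pos _ hN0
  refine ⟨by omega, fun k => ?_⟩
  have hcast : ∀ (x y : Nat), y < N → (x % N = y ↔ (x : Int) % N = (y : Int)) := by
    intro x y hy
    constructor
    · intro h; rw [← Int.natCast_mod, h]
    · intro h
      have := Int.natCast_mod x N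
      omega
  have htn : ((((p : Int) - s).emod N).toNat : Int) = ((p : Int) - s).emod N :=
    Int.toNat_of_nonneg hnn
  rw [hcast (s + k) p hp, hcast k (((p : Int) - s).emod N).toNat (by omega), htn]
  push_cast
  constructor
  · intro h
    calc (k : Int) % N = ((s : Int) + k - s) % N := by ring_nf
    _ = (((s : Int) + k) % N - (s : Int)) % N := (pvSubEmod _ _ _).symm
    _ = ((p : Int) - s) % N := by rw [h]
  · intro h
    calc ((s : Int) + k) % N = ((s : Int) % N + (k : Int) % N) % N := Int.add_emod _ _ _
    _ = ((s : Int) % N + ((p : Int) - s) % N) % N := by rw [h]; rfl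
    _ = ((s : Int) + ((p : Int) - s)) % N := (Int.add_emod _ _ _).symm
    _ = (p : Int) % N := by rw [show (s : Int) + ((p : Int) - s) = (p : Int) from by ring]
    _ = (p : Int) := Int.emod_eq_of_lt (by omega) (by exact_mod_cast hp)

theorem pvD_at_j (s a N : Nat) (hs : s < N) :
    (((((s + a) % N : Nat) : Int) - s).emod N).toNat = a % N := by
  have key : (((((s + a) % N : Nat) : Int) - s) % N) = ((a % N : Nat) : Int) := by
    calc ((((s + a) % N : Nat) : Int) - s) % N
        = (((s : Int) + a) % N - s) % N := by push_cast; rfl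
    _ = (((s : Int) + a) - s) % N := pvSubEmod _ _ _
    _ = (a : Int) % N := by ring_nf
    _ = ((a % N : Nat) : Int) := (Int.natCast_mod a N).symm
  rw [show Int.emod ((((s + a) % N : Nat) : Int) - s) N = (((((s + a) % N : Nat) : Int) - s) % N) from rfl,
      key]
  exact Int.toNat_natCast _

theorem pvSetGetD_eq (xs : List Int) (i p : Nat) (v : Int) (hi : i < xs.length) (h : i = p) :
    (xs.set i v).getD p 0 = v := by
  subst h; simp [List.getD, List.getElem?_set, hi]

theorem pvSetGetD_ne (xs : List Int) (i p : Nat) (v : Int) (h : ¬ i = p) :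
    (xs.set i v).getD p 0 = xs.getD p 0 := by
  simp [List.getD, List.getElem?_set, h]

theorem pvExtGetD (xs ys : List Int) (hlen : xs.length = ys.length)
    (h : ∀ p, p < xs.length → xs.getD p 0 = ys.getD p 0) : xs = ys := by
  apply List.ext_getElem hlen
  intro p h1 h2
  have := h p h1
  rwa [List.getD_eq_getElem _ _ h1, List.getD_eq_getElem _ _ h2] at this

-- python xs[i] = v / xs[i] for an in-range (possibly negative) index, at the wrapped position
theorem pvWrapMod (L i : Int) (h0 : ¬ 0 ≤ i) (hlo : -L ≤ i) (hL : 0 < L) :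
    i % L = i + L := by
  have h2 : (i + L * 1) % L = i % L := Int.add_mul_emod_self_left _ _ _
  have h3 : (i + L) % L = i + L := Int.emod_eq_of_lt (by omega) (by omega)
  calc i % L = (i + L * 1) % L := h2.symm
  _ = i + L := by rw [mul_one]; exact h3

theorem pvSetWrap (xs : List Int) (i v : Int)
    (hlo : -(xs.length : Int) ≤ i) (hhi : i < xs.length) :
    PySem.List.pySetD xs i v = xs.set ((i % (xs.length : Int)).toNat) v := by
  by_cases h0 : 0 ≤ i
  · rw [PySem.List.pySetD_of_nonneg _ _ h0, Int.emod_eq_of_lt h0 hhi]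
  · have hL : (0 : Int) < (xs.length : Int) := by omega
    have h1 := pvWrapMod (xs.length : Int) i h0 hlo hL
    have hstep : PySem.List.pySetD xs i v = xs.set (xs.length - (-i).toNat) v := by
      simp [PySem.List.pySetD, PySem.List.pySet?, PySem.List.pyIdx?, h0, hlo]
    rw [hstep, h1]
    congr 1
    omega

theorem pvGetWrap (xs : List Int) (i : Int) (d : Int)
    (hlo : -(xs.length : Int) ≤ i) (hhi : i < xs.length) :
    PySem.List.pyGetD xs i d = xs.getD ((i % (xs.length : Int)).toNat) d := by
  by_cases h0 : 0 ≤ i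
  · rw [Int.emod_eq_of_lt h0 hhi, PySem.List.pyGetD_eq_getElem _ _ h0 hhi,
        List.getD_eq_getElem _ _ (by omega)]
  · have hL : (0 : Int) < (xs.length : Int) := by omega
    have h1 := pvWrapMod (xs.length : Int) i h0 hlo hL
    have hstep : PySem.List.pyGetD xs i d = xs.getD (xs.length - (-i).toNat) d := by
      simp [PySem.List.pyGetD, PySem.List.pyGet?, PySem.List.pyIdx?, h0, hlo, List.getD]
    rw [hstep, h1]
    congr 1
    omega

theorem pvResGetD (b' : List Int) (s M p N : Nat) (hNlen : b'.length = N) (hs : s < N)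
    (hp : p < N) :
    ((PySem.List.enumerate b' 0).map
      (fun pv => pv.2 + ((M / N : Nat) : Int) +
        (if PySem.Int.mod (pv.1 - ((s : Nat) : Int)) ((N : Nat) : Int) < ((M % N : Nat) : Int)
         then 1 else 0))).getD p 0
    = b'.getD p 0 + (pvCnt N M s p : Int) := by
  have hN : 0 < N := by omega
  have hNI : (0 : Int) < (N : Int) := by exact_mod_cast hN
  rw [PySem.List.enumerate_eq_zipIdx_map, List.map_map]
  rw [List.getD_eq_getElem _ _ (by simp [hNlen]; omega)]
  simp only [List.getElem_map, List.getElem_zipIdx, Function.comp_def]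
  obtain ⟨hdlt, hdiff⟩ := pvD_spec s p N hs hp
  rw [pvCnt_closed N M s p _ hN hdlt hdiff]
  have hnn : 0 ≤ ((p : Int) - s).emod N := Int.emod_nonneg _ (by omega)
  simp only [zero_add]
  have hmod : PySem.Int.mod ((p : Int) - s) N = ((p : Int) - s).emod N :=
    PySem.Int.mod_eq_emod_of_pos hNI
  rw [hmod]
  have hcond : (((p : Int) - s).emod N < ((M % N : Nat) : Int))
      ↔ ((((p : Int) - s).emod N).toNat < M % N) := by omega
  rw [List.getD_eq_getElem _ _ (by omega)]
  by_cases hc : (((p : Int) - s).emod N).toNat < M % N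
  · rw [if_pos (hcond.mpr hc), if_pos hc]; push_cast; ring
  · rw [if_neg (fun hh => hc (hcond.mp hh)), if_neg hc]; push_cast; ring

theorem getFutureState_main : ∀ (select : Int) (board : List Int) (maxPlayer : Bool),
    Pre_getFutureState select board maxPlayer →
    getFutureState select board maxPlayer = getFutureState_alt select board maxPlayer := by
  intro select board mp hpre
  obtain ⟨h1, h2, hsteal⟩ := hpre
  have hN : 0 < board.length := by omega
  have hk : (select - 1).toNat < board.length := by omega
  have hget : PySem.List.pyGet? board (select - 1) = some board[(select - 1).toNat] :=
    PySem.List.pyGet?_eq_some_getElem _ (by omega) (by omega)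
  have hset : PySem.List.pySetD board (select - 1) 0 = board.set (select - 1).toNat 0 :=
    PySem.List.pySetD_of_nonneg _ _ (by omega)
  have he0 : (if mp then false else true) = !mp := by cases mp <;> rfl
  have hA : getFutureState select board mp
      = pvALoop mp (board[(select - 1).toNat]).toNat select
          (board.set (select - 1).toNat 0) (!mp) := by
    simp only [getFutureState, hget, hset, he0]
  by_cases hm0 : board[(select - 1).toNat] ≤ 0
  · -- no stones: the loop body never runs
    have hz : (board[(select - 1).toNat]).toNat = 0 := by omega
    rw [hA, hz]
    simp only [getFutureState_alt, hget, hset, if_pos hm0]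
    rfl
  · -- at least one stone
    rw [hA]
    simp only [getFutureState_alt, hget, hset, if_neg hm0]
    set b' : List Int := board.set (select - 1).toNat 0 with hb'def
    have hlen' : b'.length = board.length := by simp [hb'def]
    set Mn : Nat := (board[(select - 1).toNat]).toNat with hMndef
    have hMeq : ((Mn : Nat) : Int) = board[(select - 1).toNat] := Int.toNat_of_nonneg (by omega)
    have hM1 : 1 ≤ Mn := by omega
    set s : Nat := select.toNat % board.length with hsdef
    have hsN : s < board.length := Nat.mod_lt _ hN
    set jN : Nat := (s + (Mn - 1)) % board.length with hjNdef
    have hjlt : jN < board.length := Nat.mod_lt _ hN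
    set S : List Int := pvSow (Mn - 1) s b' with hSdef
    have hSlen : S.length = board.length := by rw [hSdef, pvSow_length, hlen']
    -- A side: loop = sow (Mn-1) then final step
    have hAeq : pvALoop mp Mn select b' (!mp) = pvFinal mp S (↑jN) (!mp) := by
      have hx := pvALoop_eq mp (Mn - 1) select b' (!mp) (by omega) (by omega)
        (by rw [hlen']; exact_mod_cast h2)
      rw [show Mn - 1 + 1 = Mn from by omega, hlen'] at hx
      exact hx
    rw [hAeq]
    -- B side: normalize all the integer arithmetic to Nat form
    have hsB : PySem.Int.mod select ↑board.length = ((s : Nat) : Int) := by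
      conv_lhs => rw [← Int.toNat_of_nonneg (show 0 ≤ select by omega)]
      rw [PySem.Int.mod_natCast]
    have hq : PySem.Int.floordiv board[(select - 1).toNat] ↑board.length
        = ((Mn / board.length : Nat) : Int) := by
      conv_lhs => rw [← hMeq]
      rw [PySem.Int.floordiv_natCast]
    have hr : PySem.Int.mod board[(select - 1).toNat] ↑board.length
        = ((Mn % board.length : Nat) : Int) := by
      conv_lhs => rw [← hMeq]
      rw [PySem.Int.mod_natCast]
    have hjB : PySem.Int.mod (((s : Nat) : Int) + board[(select - 1).toNat] - 1) ↑board.length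
        = ((jN : Nat) : Int) := by
      rw [show ((s : Nat) : Int) + board[(select - 1).toNat] - 1
            = ((s + (Mn - 1) : Nat) : Int) from by push_cast; omega,
          PySem.Int.mod_natCast]
    have hq1 : PySem.Int.floordiv (board[(select - 1).toNat] - 1) ↑board.length
        = (((Mn - 1) / board.length : Nat) : Int) := by
      rw [show board[(select - 1).toNat] - 1 = (((Mn - 1) : Nat) : Int) from by push_cast; omega,
          PySem.Int.floordiv_natCast]
    rw [hsB, hq, hr, hjB, hq1]
    set res : List Int := List.map
        (fun pv => pv.2 + ((Mn / board.length : Nat) : Int) +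
          if PySem.Int.mod (pv.1 - ((s : Nat) : Int)) ↑board.length
              < ((Mn % board.length : Nat) : Int) then 1 else 0)
        (PySem.List.enumerate b') with hresdef
    have hresLen : res.length = board.length := by
      rw [hresdef, List.length_map, PySem.List.enumerate_eq_zipIdx_map, List.length_map,
        List.length_zipIdx, hlen']
    -- the closed-form distribution equals "sow Mn-1 stones, then one more at jN"
    have hd0 := pvD_spec s jN board.length hsN hjlt
    have hdj : (((jN : Int) - s).emod board.length).toNat = (Mn - 1) % board.length := by
      rw [hjNdef]; exact pvD_at_j s (Mn - 1) board.length hsN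
    have hiffj : ∀ k, (s + k) % board.length = jN ↔ k % board.length = (Mn - 1) % board.length := by
      intro k; rw [← hdj]; exact hd0.2 k
    have hcntj : pvCnt board.length (Mn - 1) s jN = (Mn - 1) / board.length := by
      rw [pvCnt_closed board.length (Mn - 1) s jN ((Mn - 1) % board.length) hN
        (Nat.mod_lt _ hN) hiffj]
      simp
    have hSj : S.getD jN 0 = b'.getD jN 0 + (((Mn - 1) / board.length : Nat) : Int) := by
      rw [hSdef, pvSow_getD (Mn - 1) s b' jN (by omega) (by omega), hlen', hcntj]
    have hresGet : ∀ p, p < board.length →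
        res.getD p 0 = S.getD p 0 + (if p = jN then 1 else 0) := by
      intro p hp
      rw [hresdef, pvResGetD b' s Mn p board.length hlen' hsN hp,
        hSdef, pvSow_getD (Mn - 1) s b' p (by omega) (by omega), hlen']
      have hsucc : pvCnt board.length Mn s p
          = pvCnt board.length (Mn - 1) s p + if jN = p then 1 else 0 := by
        conv_lhs => rw [show Mn = Mn - 1 + 1 from by omega]
        rw [pvCnt_succ, hjNdef]
      rw [hsucc]
      by_cases hpj : p = jN
      · rw [if_pos hpj.symm, if_pos hpj]; push_cast; ring
      · rw [if_neg (fun hh => hpj hh.symm), if_neg hpj]; push_cast; ring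
    -- align A's final-step condition with B's and decide the steal jointly
    simp only [pvFinal, PySem.List.pyGetD_natCast, PySem.List.pySetD_natCast]
    rw [hSj]
    by_cases hfire : b'.getD jN 0 + (((Mn - 1) / board.length : Nat) : Int) = 0
        ∧ ((jN : Nat) : Int) ≠ 6 ∧ ((jN : Nat) : Int) ≠ 13
    · -- the steal fires
      rw [if_pos hfire, if_pos hfire]
      have hstealJ : (13 : Int) - ↑board.length ≤ ↑jN := by
        have hmPre : PySem.List.pyGetD board (select - 1) 0 = board[(select - 1).toNat] :=
          PySem.List.pyGetD_eq_getElem _ _ (by omega) (by omega)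
        simp only [hset, hmPre] at hsteal
        rw [hsB, hjB, hq1, PySem.List.pyGetD_natCast] at hsteal
        exact hsteal ⟨by omega, hfire.1, hfire.2.1, hfire.2.2⟩
      have hjlo : -(board.length : Int) ≤ 12 - ↑jN := by omega
      have hjhi : (12 : Int) - ↑jN < ↑board.length := by omega
      set t : Nat := ((12 - (jN : Int)) % (board.length : Int)).toNat with htdef
      have htlt : t < board.length := by
        have hx1 : 0 ≤ (12 - (jN : Int)) % ↑board.length := Int.emod_nonneg _ (by omega)
        have hx2 : (12 - (jN : Int)) % ↑board.length < ↑board.length :=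
          Int.emod_lt_of_pos _ (by omega)
        omega
      have htB : PySem.Int.mod (12 - ((jN : Nat) : Int)) ↑board.length = ((t : Nat) : Int) := by
        rw [PySem.Int.mod_eq_emod_of_pos (by exact_mod_cast hN), htdef]
        exact (Int.toNat_of_nonneg (Int.emod_nonneg _ (by omega))).symm
      rw [htB]
      have hgT : PySem.List.pyGetD S (12 - ((jN : Nat) : Int)) 0 = S.getD t 0 := by
        rw [pvGetWrap S _ _ (by omega) (by omega), hSlen]
      have hsT : ∀ (xs : List Int) (v : Int), xs.length = board.length →
          PySem.List.pySetD xs (12 - ((jN : Nat) : Int)) v = xs.set t v := by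
        intro xs v hxl
        rw [pvSetWrap xs _ _ (by omega) (by omega), hxl]
      rw [hgT, hsT _ _ (by simp [hSlen])]
      have hS0 : S.getD jN 0 = 0 := by rw [hSj]; exact hfire.1
      by_cases ht : t = jN
      · -- the opposite pit is the landing pit itself: the steal is a no-op before the drop
        rw [if_neg (by omega : ¬ ((t : Nat) : Int) ≠ ((jN : Nat) : Int))]
        rw [ht]
        congr 1
        apply pvExtGetD
        · simp [hresLen, hSlen]
        · intro p hp
          have hp' : p < board.length := by simpa [hSlen] using hp
          rw [hresGet p hp']
          by_cases hpj : jN = p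
          · rw [pvSetGetD_eq _ jN p _ (by simp [hSlen, hjlt]) hpj,
              pvSetGetD_eq ((S.set jN (S.getD jN 0))) jN jN _ (by simp [hSlen, hjlt]) rfl,
              if_pos hpj.symm, ← hpj, hS0]
          · rw [pvSetGetD_ne _ jN p _ hpj, pvSetGetD_ne _ jN p _ hpj,
              pvSetGetD_ne _ jN p _ hpj, if_neg (fun hh => hpj hh.symm)]
            ring
      · -- genuine steal
        rw [if_pos (by omega : ((t : Nat) : Int) ≠ ((jN : Nat) : Int))]
        simp only [PySem.List.pyGetD_natCast, PySem.List.pySetD_natCast]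
        have hrt : res.getD t 0 = S.getD t 0 := by
          rw [hresGet t htlt, if_neg ht]; ring
        congr 1
        apply pvExtGetD
        · simp [hresLen, hSlen]
        · intro p hp
          have hp' : p < board.length := by simpa [hSlen] using hp
          by_cases hpj : jN = p
          · have hpt : ¬ t = p := fun hh => ht (hh.trans hpj.symm)
            rw [pvSetGetD_eq ((S.set jN (S.getD t 0)).set t 0) jN p _
                  (by simp [hSlen, hjlt]) hpj,
              pvSetGetD_ne (S.set jN (S.getD t 0)) t jN _ (fun hh => ht hh),
              pvSetGetD_eq S jN jN _ (by simp [hSlen, hjlt]) rfl,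
              pvSetGetD_ne (res.set jN (res.getD t 0 + 1)) t p _ hpt,
              pvSetGetD_eq res jN p _ (by simp [hresLen, hjlt]) hpj, hrt]
          · by_cases hpt : t = p
            · rw [pvSetGetD_ne ((S.set jN (S.getD t 0)).set t 0) jN p _ hpj,
                pvSetGetD_eq (S.set jN (S.getD t 0)) t p _ (by simp [hSlen, htlt]) hpt,
                pvSetGetD_eq (res.set jN (res.getD t 0 + 1)) t p _ (by simp [hresLen, htlt]) hpt]
            · rw [pvSetGetD_ne ((S.set jN (S.getD t 0)).set t 0) jN p _ hpj,
                pvSetGetD_ne (S.set jN (S.getD t 0)) t p _ hpt,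
                pvSetGetD_ne S jN p _ hpj,
                pvSetGetD_ne (res.set jN (res.getD t 0 + 1)) t p _ hpt,
                pvSetGetD_ne res jN p _ hpj,
                hresGet p hp', if_neg (fun hh => hpj hh.symm)]
              ring
    · -- no steal
      rw [if_neg hfire, if_neg hfire]
      congr 1
      apply pvExtGetD
      · simp [hresLen, hSlen]
      · intro p hp
        have hp' : p < board.length := by simpa [hSlen] using hp
        rw [hresGet p hp']
        by_cases hpj : jN = p
        · rw [pvSetGetD_eq S jN p _ (by simp [hSlen, hjlt]) hpj, if_pos hpj.symm, ← hpj, hSj]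
        · rw [pvSetGetD_ne S jN p _ hpj, if_neg (fun hh => hpj hh.symm)]
          ring

-- ===== VERDICT (by name: the statement is the Claim_ definition above) =====
theorem getFutureState_spec : Claim_equal_getFutureState := by
  intro select board maxPlayer _ hpre
  unfold Spec_getFutureState
  exact getFutureState_main select board maxPlayer hpre
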